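-- pv_equiv track=rewrite | github.com/Delta-Life/Bioinformatics | Rosalind/Bioinformatics Textbook Track/code/BA1F.py | index_min_skew
-- ===== SOURCE A (Python) =====
-- def index_min_skew(strand):
--     skew_strand = []
--     for i in strand:
--         if i == 'G':
--             skew_strand.append(1)
--         elif i == 'C':
--             skew_strand.append(-1)
--         else:
--             skew_strand.append(0)
--     skew_array = [sum(skew_strand[i:]) for i in range(len(skew_strand))]
--     return [n for n, i in enumerate(skew_array) if i == max(skew_array)]
-- ===== SOURCE B (Python) =====
-- def index_min_skew(strand):
--     # One right-to-left pass: the running total after reading position i is the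
--     # suffix sum starting at i; track the running maximum and its indices.
--     total = 0
--     best = None
--     rev_indices = []
--     for i in range(len(strand) - 1, -1, -1):
--         c = strand[i]
--         if c == 'G':
--             total += 1
--         elif c == 'C':
--             total -= 1
--         if best is None or total > best:
--             best = total
--             rev_indices = [i]
--         elif total == best:
--             rev_indices.append(i)
--     rev_indices.reverse()
--     return rev_indices
-- ===== Notes on version B (the rewrite author's own statement) =====
-- stated objective: faster
-- what changed: A rebuilds every suffix sum with a slice (quadratic) and rescans for the max; B makes one right-to-left pass that maintains the running suffix sum together with the current maximum and its index list.
import Mathlib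
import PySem

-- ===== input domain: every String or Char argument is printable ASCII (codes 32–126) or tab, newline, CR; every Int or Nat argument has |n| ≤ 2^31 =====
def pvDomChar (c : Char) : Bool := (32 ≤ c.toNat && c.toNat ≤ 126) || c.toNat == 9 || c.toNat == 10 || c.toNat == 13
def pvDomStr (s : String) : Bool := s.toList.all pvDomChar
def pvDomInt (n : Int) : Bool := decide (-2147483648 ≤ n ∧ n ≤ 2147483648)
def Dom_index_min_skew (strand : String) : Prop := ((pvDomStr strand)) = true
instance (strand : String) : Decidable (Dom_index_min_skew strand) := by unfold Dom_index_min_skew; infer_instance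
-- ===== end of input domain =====

-- B replaces A's quadratic suffix-sum-by-slice rebuild with one right-to-left pass
-- that maintains the running suffix sum and the current maximum with its indices.

-- ===== PORT A =====
def index_min_skew (strand : String) : List Int :=
  let skew_strand : List Int := strand.toList.foldl
    (fun acc i => if i = 'G' then acc ++ [1] else if i = 'C' then acc ++ [-1] else acc ++ [0]) []
  let skew_array : List Int := (PySem.List.pyRange 0 (skew_strand.length : Int)).map
    (fun i => (PySem.List.slice skew_strand (some i)).sum)
  -- Python's `i == max(skew_array)` is only evaluated when skew_array is nonempty,
  -- where max? = some m; on the empty array the loop body never runs.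
  (PySem.List.enumerate skew_array).foldl
    (fun acc p => if some p.2 = PySem.List.max? skew_array (fun y => y) then acc ++ [p.1] else acc) []

-- ===== PORT B =====
-- the body of B's `for i in range(len(strand)-1, -1, -1)` loop, state = (total, best, rev_indices)
def bStep (cs : List Char) (st : Int × Option Int × List Int) (i : Int) : Int × Option Int × List Int :=
  let c := PySem.List.pyGetD cs i 'A'   -- strand[i]; every generated i is in range
  let total := if c = 'G' then st.1 + 1 else if c = 'C' then st.1 - 1 else st.1
  match st.2.1 with
  | none => (total, some total, [i])
  | some b =>
    if b < total then (total, some total, [i])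
    else if total = b then (total, some b, st.2.2 ++ [i])
    else (total, some b, st.2.2)

def index_min_skew_alt (strand : String) : List Int :=
  let cs := strand.toList
  let st := (PySem.List.pyRange ((cs.length : Int) - 1) (-1) (-1)).foldl (bStep cs) (0, none, [])
  st.2.2.reverse

-- ===== PRECONDITION & SPEC =====
def Spec_index_min_skew (strand : String) (out : List Int) : Prop := out = index_min_skew_alt strand
instance (strand : String) (out : List Int) : Decidable (Spec_index_min_skew strand out) := by unfold Spec_index_min_skew; infer_instance

-- ===== CLAIM (what is proved, stated in full; the proofs are below) =====
def Claim_equal_index_min_skew : Prop := ∀ (strand : String), Dom_index_min_skew strand → Spec_index_min_skew strand (index_min_skew strand)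

-- ===== LEMMAS AND PROOFS =====

-- proof-side model: skew value of a char, suffix-sum list, and B's (best, indices) update
def skewVal (c : Char) : Int := if c = 'G' then 1 else if c = 'C' then -1 else 0

def suffs (s : List Int) : List Int := (List.range s.length).map (fun i => (s.drop i).sum)

def gStep (st : Option Int × List Int) (p : Int × Int) : Option Int × List Int :=
  match st.1 with
  | none => (some p.2, [p.1])
  | some b => if b < p.2 then (some p.2, [p.1]) else if p.2 = b then (some b, st.2 ++ [p.1]) else (some b, st.2)

def Hfold (xs : List Int) (st : Int) : Option Int × List Int :=
  ((PySem.List.enumerate xs st).reverse).foldl gStep (none, [])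

lemma suffs_nil : suffs [] = [] := rfl

lemma suffs_cons (x : Int) (s : List Int) : suffs (x :: s) = (x + s.sum) :: suffs s := by
  simp [suffs, List.range_succ_eq_map, List.map_map, Function.comp]

lemma Hfold_nil (st : Int) : Hfold [] st = (none, []) := rfl

lemma Hfold_cons (x : Int) (xs : List Int) (st : Int) :
    Hfold (x :: xs) st = gStep (Hfold xs (st + 1)) (st, x) := by
  simp [Hfold, PySem.List.enumerate_cons, List.foldl_append]

lemma Hfold_spec (xs : List Int) : ∀ (x : Int) (st : Int),
    Hfold (x :: xs) st = (some (List.foldl max x xs),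
      (((PySem.List.enumerate (x :: xs) st).filter
          (fun p => decide (p.2 = List.foldl max x xs))).map Prod.fst).reverse) := by
  induction xs with
  | nil =>
    intro x st
    simp [Hfold_cons, Hfold_nil, gStep, PySem.List.enumerate_cons]
  | cons y t ih =>
    intro x st
    have hM : List.foldl max x (y :: t) = max x (List.foldl max y t) := by
      show List.foldl max (max x y) t = _
      exact List.foldl_assoc
    rw [Hfold_cons, ih y (st + 1)]
    set M' := List.foldl max y t with hM'
    have hy : y ≤ M' := (PySem.List.le_foldl_max t y).1
    have ht : ∀ p ∈ PySem.List.enumerate t (st + 1 + 1), p.2 ≤ M' := by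
      intro p hp
      have hmem : p.2 ∈ t := by
        have := PySem.List.map_snd_enumerate t (st + 1 + 1)
        rw [← this]; exact List.mem_map_of_mem hp
      exact (PySem.List.le_foldl_max t y).2 _ hmem
    simp only [PySem.List.enumerate_cons, List.filter_cons]
    rcases lt_trichotomy M' x with hlt | heq | hgt
    · -- new strict maximum at the front
      have hmax : max x M' = x := max_eq_left hlt.le
      have htail : List.filter (fun p => decide (p.2 = x)) (PySem.List.enumerate t (st + 1 + 1)) = [] := by
        refine List.filter_eq_nil_iff.mpr ?_
        intro p hp
        simp only [decide_eq_true_eq]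
        intro hc
        exact absurd (hc ▸ ht p hp) (not_le.mpr hlt)
      have hyne : ¬ (y = x) := by intro h; exact absurd (h ▸ hy) (not_le.mpr hlt)
      simp [gStep, hM, hmax, hlt, hyne, htail]
    · -- front value ties the maximum of the tail
      have hmax : max x M' = M' := by rw [heq]; exact max_self _
      simp [gStep, hM, heq]
    · -- front value below the maximum of the tail
      have hmax : max x M' = M' := max_eq_right hgt.le
      simp [gStep, hM, hmax, not_lt.mpr hgt.le, (ne_of_lt hgt)]

lemma pyRange_neg_one_snoc (a b : Int) (h : b < a) :
    PySem.List.pyRange a b (-1) = PySem.List.pyRange a (b + 1) (-1) ++ [b + 1] := by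
  rw [PySem.List.pyRange_neg_one_eq_reverse, PySem.List.pyRange_neg_one_eq_reverse,
    PySem.List.pyRange_one_cons (by omega : b + 1 < a + 1)]
  simp

lemma bLoop (cs : List Char) : ∀ (full : List Char) (off : Nat), full.drop off = cs →
    (PySem.List.pyRange ((off : Int) + cs.length - 1) ((off : Int) - 1) (-1)).foldl
        (bStep full) (0, none, []) =
      ((cs.map skewVal).sum, Hfold (suffs (cs.map skewVal)) (off : Int)) := by
  induction cs with
  | nil =>
    intro full off _
    rw [PySem.List.pyRange_neg_one_eq_nil (by simp)]
    simp [Hfold_nil, suffs_nil]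
  | cons c cs' ih =>
    intro full off hdrop
    have hc : PySem.List.pyGetD full ((off : Int)) 'A' = c := by
      rw [PySem.List.pyGetD_natCast]
      have h0 : full[off]? = some c := by
        have := List.getElem?_drop (xs := full) (i := off) (j := 0)
        rw [hdrop] at this
        simpa using this.symm
      simp [List.getD, h0]
    have hsplit : PySem.List.pyRange ((off : Int) + (c :: cs').length - 1) ((off : Int) - 1) (-1)
        = PySem.List.pyRange ((off : Int) + (c :: cs').length - 1) ((off : Int)) (-1) ++ [(off : Int)] := by
      have := pyRange_neg_one_snoc ((off : Int) + (c :: cs').length - 1) ((off : Int) - 1)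
        (by simp)
      simpa using this
    have hdrop' : full.drop (off + 1) = cs' := by
      have h := congrArg (List.drop 1) hdrop
      simpa [List.drop_drop, Nat.add_comm] using h
    have hrange : PySem.List.pyRange ((off : Int) + (c :: cs').length - 1) ((off : Int)) (-1)
        = PySem.List.pyRange (((off + 1 : Nat) : Int) + cs'.length - 1) (((off + 1 : Nat) : Int) - 1) (-1) := by
      congr 1 <;> push_cast [List.length_cons] <;> omega
    rw [hsplit, List.foldl_append, hrange, ih full (off + 1) hdrop']
    have hoff : (((off + 1 : Nat) : Int)) = (off : Int) + 1 := by push_cast; ring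
    rw [hoff]
    simp only [List.map_cons, List.sum_cons]
    rw [suffs_cons, Hfold_cons]
    rcases hH : Hfold (suffs (cs'.map skewVal)) ((off : Int) + 1) with ⟨bb, r⟩
    have htot : (if c = 'G' then ((cs'.map skewVal).sum) + 1
        else if c = 'C' then ((cs'.map skewVal).sum) - 1 else ((cs'.map skewVal).sum))
        = skewVal c + (cs'.map skewVal).sum := by
      unfold skewVal; split_ifs <;> ring
    simp only [List.foldl_cons, List.foldl_nil, bStep, hc, htot, gStep]
    rcases bb with _ | b
    · rfl
    · dsimp only
      split_ifs <;> rfl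

-- A's skew_strand loop builds exactly the per-character skew values
lemma skew_strand_eq (cs : List Char) :
    cs.foldl (fun acc i => if i = 'G' then acc ++ [1] else if i = 'C' then acc ++ [-1] else acc ++ [0]) []
      = cs.map skewVal := by
  have : (fun (acc : List Int) (i : Char) =>
      if i = 'G' then acc ++ [1] else if i = 'C' then acc ++ [-1] else acc ++ [0])
      = fun acc i => acc ++ [skewVal i] := by
    funext acc i; unfold skewVal; split_ifs <;> rfl
  rw [this, PySem.List.foldl_append_singleton_eq_map]
  rfl

-- A's suffix-sum comprehension is exactly `suffs`
lemma skew_array_eq (s : List Int) :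
    (PySem.List.pyRange 0 (s.length : Int)).map (fun i => (PySem.List.slice s (some i)).sum)
      = suffs s := by
  rw [PySem.List.pyRange_zero_nat, List.map_map]
  unfold suffs
  refine List.map_congr_left ?_
  intro k _
  simp [PySem.List.slice_from_natCast]

-- ===== VERDICT (by name: the statement is the Claim_ definition above) =====
theorem index_min_skew_spec : Claim_equal_index_min_skew := by
  intro strand _
  unfold Spec_index_min_skew index_min_skew index_min_skew_alt
  simp only []
  rw [skew_strand_eq, skew_array_eq]
  have hB := bLoop strand.toList strand.toList 0 rfl
  simp only [Nat.cast_zero, zero_add, zero_sub] at hB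
  rw [hB]
  cases hcs : strand.toList.map skewVal with
  | nil =>
    simp [suffs_nil, Hfold_nil]
  | cons a s' =>
    rw [suffs_cons]
    rw [Hfold_spec (suffs s') (a + s'.sum) 0]
    rw [PySem.List.max?_id_cons]
    simp only [List.reverse_reverse]
    have hfun : (fun (acc : List Int) (p : Int × Int) =>
        if some p.2 = some (List.foldl max (a + s'.sum) (suffs s')) then acc ++ [p.1] else acc)
        = fun acc p => if decide (p.2 = List.foldl max (a + s'.sum) (suffs s')) = true
            then acc ++ [Prod.fst p] else acc := by
      funext acc p; simp
    rw [hfun, PySem.List.foldl_append_if]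
    simp
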